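-- pv_equiv track=rewrite | github.com/MeskinTomer/Project-11th-Grade---Quoridor | Python FIles/GameFunctions.py | is_trying_to_place_wall
-- ===== SOURCE A (Python) =====
-- def is_trying_to_place_wall(mouse_pos: tuple) -> str:
--     ret_val = 'invalid'
--
--     # Checking if trying to place horizontal wall
--     trying_to_place_horizontal_1 = False
--     trying_to_place_horizontal_2 = False
--     x_mouse = mouse_pos[0]
--     y_mouse = mouse_pos[1]
--     x_cord = 16
--     y_cord = 64
--     for i in range(8):
--         if x_cord <= x_mouse < x_cord + 48:
--             trying_to_place_horizontal_1 = True
--         x_cord += 80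
--     for j in range(8):
--         if y_cord <= y_mouse < y_cord + 32:
--             trying_to_place_horizontal_2 = True
--         y_cord += 80
--
--     if trying_to_place_horizontal_1 == trying_to_place_horizontal_2 == True:
--         ret_val = 'horizontal'
--
--     # Checking if trying to place vertical wall
--     trying_to_place_vertical_1 = False
--     trying_to_place_vertical_2 = False
--     x_cord = 64
--     y_cord = 16
--     for i in range(8):
--         if x_cord <= x_mouse < x_cord + 32:
--             trying_to_place_vertical_1 = True
--         x_cord += 80
--     for j in range(8):
--         if y_cord <= y_mouse < y_cord + 48:
--             trying_to_place_vertical_2 = True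
--         y_cord += 80
--     if trying_to_place_vertical_1 == trying_to_place_vertical_2 == True:
--         ret_val = 'vertical'
--
--     return ret_val
-- ===== SOURCE B (Python) =====
-- def is_trying_to_place_wall(mouse_pos: tuple) -> str:
--     x, y = mouse_pos
--     if 64 <= x < 656 and (x - 64) % 80 < 32 and 16 <= y < 624 and (y - 16) % 80 < 48:
--         return 'vertical'
--     if 16 <= x < 624 and (x - 16) % 80 < 48 and 64 <= y < 656 and (y - 64) % 80 < 32:
--         return 'horizontal'
--     return 'invalid'
-- ===== Notes on version B (the rewrite author's own statement) =====
-- stated objective: simpler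
-- what changed: Each of A's four 8-iteration window scans is replaced by a single interval bound plus modulo-80 test, and the two classifications become two guard expressions with early return.
import Mathlib
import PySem

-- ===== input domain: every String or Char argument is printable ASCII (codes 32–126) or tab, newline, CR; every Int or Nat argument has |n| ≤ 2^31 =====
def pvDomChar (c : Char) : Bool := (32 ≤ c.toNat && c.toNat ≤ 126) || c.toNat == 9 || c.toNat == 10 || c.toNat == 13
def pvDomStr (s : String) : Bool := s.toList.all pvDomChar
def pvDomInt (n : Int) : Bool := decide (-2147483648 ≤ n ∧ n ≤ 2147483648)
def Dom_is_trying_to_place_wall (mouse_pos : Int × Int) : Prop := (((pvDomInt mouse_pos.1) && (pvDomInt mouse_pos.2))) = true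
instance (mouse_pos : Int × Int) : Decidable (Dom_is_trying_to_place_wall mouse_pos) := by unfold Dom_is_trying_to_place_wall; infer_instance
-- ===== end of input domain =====

-- B replaces A's four 8-iteration scans by direct interval-plus-modulo tests (objective: simpler).

-- ===== PORT A =====
-- literal port: each Python 'for i in range(8)' is a foldl over pyRange carrying (flag, cord)
def is_trying_to_place_wall (mouse_pos : Int × Int) : String :=
  let ret_val := "invalid"
  let x_mouse := mouse_pos.1
  let y_mouse := mouse_pos.2
  let h1 := (PySem.List.pyRange 0 8 1).foldl
    (fun (s : Bool × Int) _ =>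
      (if s.2 ≤ x_mouse ∧ x_mouse < s.2 + 48 then true else s.1, s.2 + 80)) (false, 16)
  let h2 := (PySem.List.pyRange 0 8 1).foldl
    (fun (s : Bool × Int) _ =>
      (if s.2 ≤ y_mouse ∧ y_mouse < s.2 + 32 then true else s.1, s.2 + 80)) (false, 64)
  let ret_val := if h1.1 = true ∧ h2.1 = true then "horizontal" else ret_val
  let v1 := (PySem.List.pyRange 0 8 1).foldl
    (fun (s : Bool × Int) _ =>
      (if s.2 ≤ x_mouse ∧ x_mouse < s.2 + 32 then true else s.1, s.2 + 80)) (false, 64)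
  let v2 := (PySem.List.pyRange 0 8 1).foldl
    (fun (s : Bool × Int) _ =>
      (if s.2 ≤ y_mouse ∧ y_mouse < s.2 + 48 then true else s.1, s.2 + 80)) (false, 16)
  let ret_val := if v1.1 = true ∧ v2.1 = true then "vertical" else ret_val
  ret_val

-- ===== PORT B =====
def is_trying_to_place_wall_alt (mouse_pos : Int × Int) : String :=
  let x := mouse_pos.1
  let y := mouse_pos.2
  if 64 ≤ x ∧ x < 656 ∧ PySem.Int.mod (x - 64) 80 < 32 ∧
     16 ≤ y ∧ y < 624 ∧ PySem.Int.mod (y - 16) 80 < 48 then "vertical"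
  else if 16 ≤ x ∧ x < 624 ∧ PySem.Int.mod (x - 16) 80 < 48 ∧
          64 ≤ y ∧ y < 656 ∧ PySem.Int.mod (y - 64) 80 < 32 then "horizontal"
  else "invalid"

-- ===== PRECONDITION & SPEC =====
def Spec_is_trying_to_place_wall (mouse_pos : Int × Int) (out : String) : Prop := out = is_trying_to_place_wall_alt mouse_pos
instance (mouse_pos : Int × Int) (out : String) : Decidable (Spec_is_trying_to_place_wall mouse_pos out) := by unfold Spec_is_trying_to_place_wall; infer_instance

-- ===== CLAIM (what is proved, stated in full; the proofs are below) =====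
def Claim_equal_is_trying_to_place_wall : Prop := ∀ (mouse_pos : Int × Int), Dom_is_trying_to_place_wall mouse_pos → Spec_is_trying_to_place_wall mouse_pos (is_trying_to_place_wall mouse_pos)

-- ===== LEMMAS AND PROOFS =====

-- one Python scan 'for _ in range(8): if cord ≤ m < cord+w: flag=True; cord+=80', started
-- at cord = c with flag False, sets the flag iff m lies in one of the 8 windows, i.e. iff
-- c ≤ m < c+7*80+w with (m-c) % 80 < w
theorem scan_eq (m c w : Int) (hw : 0 < w) (hw80 : w ≤ 80) :
    ((PySem.List.pyRange 0 8 1).foldl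
      (fun (s : Bool × Int) _ =>
        (if s.2 ≤ m ∧ m < s.2 + w then true else s.1, s.2 + 80)) (false, c)).1
    = decide (c ≤ m ∧ m < c + 560 + w ∧ PySem.Int.mod (m - c) 80 < w) := by
  have h : PySem.List.pyRange 0 8 1 = [0,1,2,3,4,5,6,7] := by decide
  rw [h]
  simp only [List.foldl, PySem.Int.mod_eq_emod_of_pos (a := m - c) (by norm_num : (0:Int) < 80)]
  split_ifs <;> (rw [eq_comm]; simp only [decide_eq_true_eq, decide_eq_false_iff_not]) <;> omega

theorem is_trying_to_place_wall_eq (mouse_pos : Int × Int) :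
    is_trying_to_place_wall mouse_pos = is_trying_to_place_wall_alt mouse_pos := by
  obtain ⟨x, y⟩ := mouse_pos
  unfold is_trying_to_place_wall is_trying_to_place_wall_alt
  simp only [scan_eq x 16 48 (by norm_num) (by norm_num),
             scan_eq y 64 32 (by norm_num) (by norm_num),
             scan_eq x 64 32 (by norm_num) (by norm_num),
             scan_eq y 16 48 (by norm_num) (by norm_num),
             decide_eq_true_eq]
  norm_num
  split_ifs <;> first | rfl | omega

-- ===== VERDICT (by name: the statement is the Claim_ definition above) =====
theorem is_trying_to_place_wall_spec : Claim_equal_is_trying_to_place_wall := by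
  intro mp _
  exact is_trying_to_place_wall_eq mp
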